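-- pv_equiv track=rewrite | github.com/AK5123/coding-prep | solved_problems/goldenLetter.py | golden_char
-- ===== SOURCE A (Python) =====
-- def golden_char (key, st):
--     # Write your code here
--     d = set()
--     for c in key:
--         d.add(c)
--     ans = 0
--     for c in st:
--         if c in d:
--             ans += 1
--     return ans
--     pass
-- ===== SOURCE B (Python) =====
-- def golden_char(key, st):
--     return sum(st.count(c) for c in set(key))
-- ===== Notes on version B (the rewrite author's own statement) =====
-- stated objective: alternative
-- what changed: Instead of building a set of key's chars and scanning st with a per-character membership test, B iterates over key's distinct characters and sums st.count(c) over them.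
import Mathlib
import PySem

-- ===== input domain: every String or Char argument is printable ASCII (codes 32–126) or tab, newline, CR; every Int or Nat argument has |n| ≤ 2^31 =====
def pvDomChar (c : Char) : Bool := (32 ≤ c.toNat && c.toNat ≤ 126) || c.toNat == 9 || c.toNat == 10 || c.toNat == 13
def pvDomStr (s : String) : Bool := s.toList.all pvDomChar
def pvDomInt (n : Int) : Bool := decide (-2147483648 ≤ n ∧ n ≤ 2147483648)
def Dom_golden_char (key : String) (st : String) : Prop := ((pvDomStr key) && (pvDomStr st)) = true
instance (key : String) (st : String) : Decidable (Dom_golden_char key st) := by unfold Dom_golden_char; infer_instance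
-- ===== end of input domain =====

-- B replaces A's set-build-then-membership scan with summing st.count(c) over key's distinct chars (alternative decomposition, same result).


-- ===== PORT A =====
def golden_char (key : String) (st : String) : Int :=
  let d : PySem.Set Char := key.toList.foldl PySem.Set.add PySem.Set.empty
  st.toList.foldl (fun ans c => if PySem.Set.contains d c then ans + 1 else ans) 0

-- ===== PORT B =====
def golden_char_alt (key : String) (st : String) : Int :=
  ((PySem.Set.ofList key.toList).map (fun c => (st.toList.count c : Int))).sum

-- ===== PRECONDITION & SPEC =====
def Spec_golden_char (key : String) (st : String) (out : Int) : Prop := out = golden_char_alt key st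
instance (key : String) (st : String) (out : Int) : Decidable (Spec_golden_char key st out) := by unfold Spec_golden_char; infer_instance

-- ===== CLAIM (what is proved, stated in full; the proofs are below) =====
def Claim_equal_golden_char : Prop := ∀ (key : String) (st : String), Dom_golden_char key st → Spec_golden_char key st (golden_char key st)

-- ===== LEMMAS AND PROOFS =====

-- ===== VERDICT (by name: the statement is the Claim_ definition above) =====
-- sum of 0/1 indicators over a nodup list: 1 if the pivot is a member, else 0
theorem sum_indicator_nodup (a : Char) (d : List Char) (hd : d.Nodup) :
    (d.map (fun c => if c = a then (1:Int) else 0)).sum = if a ∈ d then 1 else 0 := by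
  induction d with
  | nil => simp
  | cons b d ihd =>
    obtain ⟨hb, hd'⟩ := List.nodup_cons.mp hd
    simp only [List.map_cons, List.sum_cons, List.mem_cons, ihd hd']
    by_cases h : b = a
    · subst h
      simp [hb]
    · have hne : ¬ a = b := fun h' => h h'.symm
      simp [h, hne]

theorem countP_mem_eq_sum_counts (d : List Char) (hd : d.Nodup) (st : List Char) :
    (st.countP (fun x => decide (x ∈ d)) : Int) = (d.map (fun c => (st.count c : Int))).sum := by
  induction st with
  | nil => simp
  | cons a st ih =>
    rw [List.countP_cons]
    push_cast
    rw [ih]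
    have hsplit : (d.map (fun c => ((a :: st).count c : Int))).sum
        = (d.map (fun c => (st.count c : Int))).sum + (d.map (fun c => if c = a then (1:Int) else 0)).sum := by
      rw [← List.sum_map_add]
      congr 1
      apply List.map_congr_left
      intro c _
      rw [List.count_cons]
      by_cases h : c = a
      · simp [h]
      · have : ¬ a = c := fun h' => h h'.symm
        simp [h, this]
    rw [hsplit, sum_indicator_nodup a d hd]
    by_cases h : a ∈ d <;> simp [h]

theorem golden_char_spec : Claim_equal_golden_char := by
  intro key st _
  unfold Spec_golden_char golden_char golden_char_alt
  rw [PySem.List.foldl_ite_add_one]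
  have hfold : key.toList.foldl PySem.Set.add PySem.Set.empty = PySem.Set.ofList key.toList :=
    (PySem.Set.ofList_eq_foldl key.toList).symm
  rw [hfold]
  simp only [PySem.Set.contains_iff]
  rw [zero_add]
  exact countP_mem_eq_sum_counts _ (PySem.Set.nodup_ofList _) _
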